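-- pv_equiv track=rewrite | github.com/ak-1/sqlport | sqlport/writers/postgres.py | map_matches
-- ===== SOURCE A (Python) =====
-- def map_matches(txt):
--     r = ""
--     quote = False
--     charset = False
--     for c in txt:
--         if quote:
--             quote = False
--         elif c == "]":
--             charset = False
--         elif charset:
--             pass
--         elif c == "[":
--             charset = True
--         elif c == "\\":
--             quote = True
--         elif c == "?":
--             c = "_"
--         elif c == "*":
--             c = "%"
--         r += c
--     return r
-- ===== SOURCE B (Python) =====
-- def map_matches(txt):
--     out = []
--     i = 0
--     n = len(txt)
--     while i < n:
--         c = txt[i]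
--         if c == "[":
--             j = txt.find("]", i)
--             if j == -1:
--                 out.append(txt[i:])
--                 i = n
--             else:
--                 out.append(txt[i:j + 1])
--                 i = j + 1
--         elif c == "\\":
--             out.append(txt[i:i + 2])
--             i += 2
--         elif c == "?":
--             out.append("_")
--             i += 1
--         elif c == "*":
--             out.append("%")
--             i += 1
--         else:
--             out.append(c)
--             i += 1
--     return "".join(out)
-- ===== Notes on version B (the rewrite author's own statement) =====
-- stated objective: alternative
-- what changed: Replaced A's per-character scan with quote/charset boolean state flags by an index-based segment scan that copies each bracket class (through the next closing bracket found via find, or to the end if unclosed) and each backslash escape pair verbatim as whole slices, mapping ?/* only in the default branch.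
import Mathlib
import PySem

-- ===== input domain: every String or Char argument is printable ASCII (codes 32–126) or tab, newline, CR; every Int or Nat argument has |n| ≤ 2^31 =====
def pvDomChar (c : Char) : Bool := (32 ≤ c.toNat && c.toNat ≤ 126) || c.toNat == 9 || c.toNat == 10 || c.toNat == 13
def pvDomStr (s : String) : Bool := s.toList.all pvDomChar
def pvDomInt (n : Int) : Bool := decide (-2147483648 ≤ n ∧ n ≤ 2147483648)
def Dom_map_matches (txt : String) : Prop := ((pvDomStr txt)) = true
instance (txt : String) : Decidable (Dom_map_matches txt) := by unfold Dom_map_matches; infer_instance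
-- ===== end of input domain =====

-- B replaces A's per-char quote/charset flag machine by a segment scan that copies bracket
-- classes and escape pairs as whole segments (objective: alternative decomposition, same cost).

-- ===== PORT A =====
-- state = (r, quote, charset); the accumulated string r is kept as a List Char
def mmStep : (List Char × Bool × Bool) → Char → (List Char × Bool × Bool)
  | (r, quote, charset), c =>
    if quote then (r ++ [c], false, charset)
    else if c = ']' then (r ++ [c], quote, false)
    else if charset then (r ++ [c], quote, charset)
    else if c = '[' then (r ++ [c], quote, true)
    else if c = '\\' then (r ++ [c], true, charset)
    else if c = '?' then (r ++ ['_'], quote, charset)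
    else if c = '*' then (r ++ ['%'], quote, charset)
    else (r ++ [c], quote, charset)

def map_matches (txt : String) : String :=
  String.ofList (txt.toList.foldl mmStep ([], false, false)).1

-- ===== PORT B =====
-- segment scan: '[': copy through the next ']' (or to the end); '\': copy the pair; else map ?/*
def mmAlt : List Char → List Char
  | [] => []
  | c :: rest =>
    if c = '[' then
      match hbr : rest.dropWhile (· ≠ ']') with
      | [] => c :: rest
      | _ :: tl => c :: rest.takeWhile (· ≠ ']') ++ ']' :: mmAlt tl
    else if c = '\\' then
      match rest with
      | [] => [c]
      | d :: tl => c :: d :: mmAlt tl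
    else if c = '?' then '_' :: mmAlt rest
    else if c = '*' then '%' :: mmAlt rest
    else c :: mmAlt rest
termination_by l => l.length
decreasing_by
  · have h1 : (rest.dropWhile (· ≠ ']')).length ≤ rest.length :=
      List.Sublist.length_le (List.dropWhile_sublist _)
    rw [hbr] at h1
    simp at h1 ⊢
    omega
  · simp
  · simp
  · simp
  · simp

def map_matches_alt (txt : String) : String := String.ofList (mmAlt txt.toList)

-- ===== PRECONDITION & SPEC =====
def Spec_map_matches (txt : String) (out : String) : Prop := out = map_matches_alt txt
instance (txt : String) (out : String) : Decidable (Spec_map_matches txt out) := by unfold Spec_map_matches; infer_instance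

-- ===== CLAIM (what is proved, stated in full; the proofs are below) =====
def Claim_equal_map_matches : Prop := ∀ (txt : String), Dom_map_matches txt → Spec_map_matches txt (map_matches txt)

-- ===== LEMMAS AND PROOFS =====

-- in the charset state A copies verbatim until the first ']', which turns the state off
theorem mm_charset (l : List Char) (r : List Char) :
    l.foldl mmStep (r, false, true) =
      (match l.dropWhile (· ≠ ']') with
       | [] => (r ++ l, false, true)
       | _ :: tl => tl.foldl mmStep (r ++ l.takeWhile (· ≠ ']') ++ [']'], false, false)) := by
  induction l generalizing r with
  | nil => simp
  | cons c rest ih =>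
    by_cases hc : c = ']'
    · subst hc
      simp [mmStep]
    · simp only [List.foldl_cons, mmStep, if_neg hc, Bool.false_eq_true, if_false, if_true,
        List.dropWhile_cons, List.takeWhile_cons]
      rw [ih]
      simp [hc]

theorem mm_main (l : List Char) (r : List Char) :
    (l.foldl mmStep (r, false, false)).1 = r ++ mmAlt l := by
  induction l using mmAlt.induct generalizing r with
  | case1 => simp [mmAlt]
  | case2 rest h =>
    have htw := List.takeWhile_append_dropWhile (p := fun x => decide (x ≠ ']')) (l := rest)
    rw [h, List.append_nil] at htw
    simp only [List.foldl_cons, mmStep, Bool.false_eq_true, if_false, if_true]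
    rw [if_neg (by decide : ¬('[' = ']')), mm_charset]
    simp only [ne_eq, decide_not] at h htw
    simp only [ne_eq, decide_not, h]
    rw [mmAlt.eq_def]
    dsimp only
    rw [if_pos rfl]
    split
    · simp
    · next heq =>
      simp only [ne_eq, decide_not] at heq
      rw [h] at heq
      cases heq
  | case3 rest head tl h ih =>
    simp only [List.foldl_cons, mmStep, Bool.false_eq_true, if_false, if_true]
    rw [if_neg (by decide : ¬('[' = ']')), mm_charset]
    simp only [ne_eq, decide_not] at h
    simp only [ne_eq, decide_not, h]
    rw [mmAlt.eq_def]
    dsimp only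
    rw [if_pos rfl]
    split
    · next heq =>
      simp only [ne_eq, decide_not] at heq
      rw [h] at heq
      cases heq
    · next heq =>
      simp only [ne_eq, decide_not] at heq
      rw [h] at heq
      injection heq with h1 h2
      subst h2
      rw [ih]
      simp
  | case4 _ =>
    rw [mmAlt.eq_def]
    simp [mmStep]
  | case5 d tl _ ih =>
    simp only [List.foldl_cons, mmStep, Bool.false_eq_true, if_false, if_true]
    rw [mmAlt.eq_def]
    simp [ih]
  | case6 tl _ _ ih =>
    rw [mmAlt.eq_def]
    simp [mmStep, ih]
  | case7 tl _ _ _ ih =>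
    rw [mmAlt.eq_def]
    simp [mmStep, ih]
  | case8 d tl h1 h2 h3 h4 ih =>
    by_cases hd : d = ']'
    · subst hd
      rw [mmAlt.eq_def]
      simp [mmStep, ih]
    · rw [mmAlt.eq_def]
      simp [mmStep, h1, h2, h3, h4, hd, ih]

-- ===== VERDICT (by name: the statement is the Claim_ definition above) =====
theorem map_matches_spec : Claim_equal_map_matches := by
  intro txt _
  unfold Spec_map_matches map_matches map_matches_alt
  rw [mm_main]
  simp
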